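-- pv_equiv track=rewrite | github.com/diwert-ai/Problems | Problems/Checkio/Elementary/fibo poem.py | fibo_poem
-- ===== SOURCE A (Python) =====
-- def fibo_poem(text: str) -> str:
--     if text == '':
--         return ''
--     result, fibo_series, words = '', fibo_series_generator(), text.split()
--     current_linebreak_index, previous_linebreak_index, num_words = next(fibo_series), 0, len(words)
--     for word_index in range(num_words):
--         result += words[word_index]
--         if word_index + 1 == current_linebreak_index:
--             result += '\n'
--             previous_linebreak_index = current_linebreak_index
--             current_linebreak_index += next(fibo_series)
--         else:
--             result += ' '
--     if num_words == previous_linebreak_index: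
--         current_linebreak_index = previous_linebreak_index
--     return result[:-1] + (current_linebreak_index-num_words)*' _'
--
-- def fibo_series_generator():
--     last_two_fibo_nums = [1, 1]
--     yield last_two_fibo_nums[0]
--     yield last_two_fibo_nums[1]
--     while True:
--         next_fibo_num = sum(last_two_fibo_nums)
--         last_two_fibo_nums[0], last_two_fibo_nums[1] = last_two_fibo_nums[1], next_fibo_num
--         yield next_fibo_num
-- ===== SOURCE B (Python) =====
-- def fibo_poem(text: str) -> str:
--     words = text.split()
--     if not words:
--         return ''
--     n = len(words)
--     sizes, total = [], 0
--     a, b = 1, 1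
--     while total < n:
--         sizes.append(a)
--         total += a
--         a, b = b, a + b
--     lines, i = [], 0
--     for s in sizes:
--         lines.append(' '.join(words[i:i + s]))
--         i += s
--     return '\n'.join(lines) + (total - n) * ' _'
-- ===== Notes on version B (the rewrite author's own statement) =====
-- stated objective: simpler
-- what changed: Replaces A's generator-threaded single pass with index/linebreak bookkeeping and a trailing-separator strip by first computing the list of fibonacci chunk sizes and their total, then slicing the words into chunks, joining each chunk with spaces and the lines with newlines, and appending total-minus-wordcount pads.
import Mathlib
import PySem

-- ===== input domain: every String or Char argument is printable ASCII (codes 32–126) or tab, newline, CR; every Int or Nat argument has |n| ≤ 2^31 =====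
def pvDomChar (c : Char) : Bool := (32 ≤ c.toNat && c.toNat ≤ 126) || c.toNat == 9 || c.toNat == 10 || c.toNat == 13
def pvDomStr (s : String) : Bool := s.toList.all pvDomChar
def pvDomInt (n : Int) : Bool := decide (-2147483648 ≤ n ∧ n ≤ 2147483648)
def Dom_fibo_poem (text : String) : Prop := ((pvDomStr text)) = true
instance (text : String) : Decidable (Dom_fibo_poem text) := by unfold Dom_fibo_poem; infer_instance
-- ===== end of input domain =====

-- B replaces A's generator-threaded single pass with index bookkeeping by a
-- precompute-the-fibonacci-chunk-sizes-then-slice-and-join decomposition (objective: simpler).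

-- ===== PORT A =====
-- A's loop body: state (result, current_linebreak_index, previous_linebreak_index, generator state (ga, gb));
-- the generator state (ga, gb) yields ga and moves to (gb, ga+gb), which is exactly fibo_series_generator
-- after its first value has been consumed into current_linebreak_index.
def aStep (words : List (List Char)) :
    (List Char × Int × Int × Int × Int) → Int → (List Char × Int × Int × Int × Int)
  | (res, cur, prev, ga, gb), i =>
    let res := res ++ PySem.List.pyGetD words i []     -- result += words[word_index]
    if i + 1 = cur then
      (res ++ ['\n'], cur + ga, cur, gb, ga + gb)      -- result += '\n'; prev = cur; cur += next(g)
    else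
      (res ++ [' '], cur, prev, ga, gb)                -- result += ' '

-- strings are handled as their code-point lists (PySem.Chars is exact there); String.ofList rebuilds the result
def fibo_poem (text : String) : String :=
  if text = "" then "" else
  let words := PySem.Chars.split₀ text.toList          -- text.split()
  let n := words.length
  -- cur = next(g) = 1, prev = 0, generator state now (1, 2)
  let st := (PySem.List.pyRange 0 (n : Int) 1).foldl (aStep words) ([], 1, 0, 1, 2)
  let cur : Int := if (n : Int) = st.2.2.1 then st.2.2.1 else st.2.1
  -- result[:-1] + (cur - n) * ' _'
  String.ofList (PySem.Chars.slice st.1 none (some (-1)) ++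
             (List.replicate (cur - (n : Int)).toNat [' ', '_']).flatten)

-- ===== PORT B =====
-- Source B's while loop: collect fibonacci sizes while total < n; each size is ≥ 1 so at most n
-- iterations happen — fuel = n only makes the recursion total, it is never exhausted.
def fiboSizes : Nat → Nat → Nat → Nat → Nat → List Nat × Nat
  | 0, _, _, total, _ => ([], total)
  | fuel + 1, a, b, total, n =>
    if total < n then
      let r := fiboSizes fuel b (a + b) (total + a) n
      (a :: r.1, r.2)
    else ([], total)

-- Source B's for loop: words[i:i+s] for consecutive i is take s / drop s of the remaining words
def chunkLines : List Nat → List (List Char) → List (List Char)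
  | [], _ => []
  | s :: rest, ws => PySem.Chars.join [' '] (ws.take s) :: chunkLines rest (ws.drop s)

def fibo_poem_alt (text : String) : String :=
  let words := PySem.Chars.split₀ text.toList          -- text.split()
  if words = [] then "" else
  let r := fiboSizes words.length 1 1 0 words.length
  String.ofList (PySem.Chars.join ['\n'] (chunkLines r.1 words) ++
             (List.replicate (r.2 - words.length) [' ', '_']).flatten)

-- ===== PRECONDITION & SPEC =====
def Spec_fibo_poem (text : String) (out : String) : Prop := out = fibo_poem_alt text
instance (text : String) (out : String) : Decidable (Spec_fibo_poem text out) := by unfold Spec_fibo_poem; infer_instance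

-- ===== CLAIM (what is proved, stated in full; the proofs are below) =====
def Claim_equal_fibo_poem : Prop := ∀ (text : String), Dom_fibo_poem text → Spec_fibo_poem text (fibo_poem text)

-- ===== LEMMAS AND PROOFS =====

-- fiboSizes ignores its fuel once total ≥ n
theorem fiboSizes_stop (fuel a b total n : Nat) (h : n ≤ total) :
    fiboSizes fuel a b total n = ([], total) := by
  cases fuel with
  | zero => rfl
  | succ fuel => simp [fiboSizes, Nat.not_lt.mpr h]

-- the accumulated total only shifts the result
theorem fiboSizes_shift (fuel : Nat) : ∀ (a b t n : Nat), t ≤ n →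
    fiboSizes fuel a b t n =
      ((fiboSizes fuel a b 0 (n - t)).1, t + (fiboSizes fuel a b 0 (n - t)).2) := by
  induction fuel with
  | zero => intro a b t n _; simp [fiboSizes]
  | succ fuel ih =>
    intro a b t n ht
    by_cases h : t < n
    · have h0 : 0 < n - t := by omega
      simp only [fiboSizes, if_pos h, if_pos h0, Nat.zero_add]
      by_cases h2 : t + a ≤ n
      · rw [ih b (a + b) (t + a) n h2, ih b (a + b) a (n - t) (by omega)]
        have e : n - (t + a) = n - t - a := by omega
        simp [e]; omega
      · rw [fiboSizes_stop fuel b (a + b) (t + a) n (by omega),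
            fiboSizes_stop fuel b (a + b) a (n - t) (by omega)]
    · have h0 : ¬ 0 < n - t := by omega
      simp [fiboSizes, h, h0]

-- joining with a separator and adding a trailing separator is flatMap (· ++ sep)
theorem join_flatMap (c : Char) : ∀ (ws : List (List Char)), ws ≠ [] →
    PySem.Chars.join [c] ws ++ [c] = ws.flatMap (· ++ [c]) := by
  intro ws
  induction ws with
  | nil => intro h; exact absurd rfl h
  | cons w rest ih =>
    intro _
    cases rest with
    | nil => simp [PySem.Chars.join_singleton]
    | cons y t =>
      rw [PySem.Chars.join_cons_cons]
      simp only [List.flatMap_cons] at *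
      rw [← ih (by simp)]
      simp

-- one complete chunk of A's loop: indices i .. i+s-1 with cur = i+s; only the last index breaks
theorem chunk_fold (words : List (List Char)) (s : Nat) : ∀ (i : Nat) (res : List Char) (p ga gb : Int),
    1 ≤ s → i + s ≤ words.length →
    (PySem.List.pyRange (i : Int) ((i : Int) + s) 1).foldl (aStep words) (res, (i : Int) + s, p, ga, gb)
      = (res ++ PySem.Chars.join [' '] ((words.drop i).take s) ++ ['\n'],
         ((i : Int) + s) + ga, (i : Int) + s, gb, ga + gb) := by
  induction s with
  | zero => intro i res p ga gb h1 _; omega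
  | succ s ih =>
    intro i res p ga gb _ h2
    have hi : i < words.length := by omega
    have hdrop : words.drop i = words[i] :: words.drop (i + 1) := List.drop_eq_getElem_cons hi
    have hget : PySem.List.pyGetD words (i : Int) [] = words[i] := by
      rw [PySem.List.pyGetD_natCast]; exact List.getD_eq_getElem words [] hi
    cases Nat.eq_zero_or_pos s with
    | inl hz =>
      subst hz
      have hr : PySem.List.pyRange (i : Int) ((i : Int) + (1:Nat)) 1 = [(i : Int)] := by
        push_cast; exact PySem.List.pyRange_one_singleton (i : Int)
      rw [hr]
      simp only [List.foldl, aStep, hget]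
      rw [if_pos (by push_cast; ring)]
      have h3 : List.take 1 (List.drop i words) = [words[i]] := by rw [hdrop]; rfl
      rw [h3, PySem.Chars.join_singleton]
      push_cast
      simp
      rfl
    | inr hs =>
      have hcons : PySem.List.pyRange (i : Int) ((i : Int) + (s+1:Nat)) 1
          = (i : Int) :: PySem.List.pyRange ((i : Int) + 1) ((i : Int) + (s+1:Nat)) 1 :=
        PySem.List.pyRange_one_cons (by push_cast; omega)
      rw [hcons]
      simp only [List.foldl, aStep, hget]
      rw [if_neg (by push_cast; omega)]
      have hcast : (i : Int) + ((s+1:Nat) : Int) = ((i+1 : Nat) : Int) + (s : Int) := by push_cast; ring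
      rw [hcast, show ((i:Int)+1) = ((i+1 : Nat) : Int) from by push_cast; ring]
      rw [ih (i + 1) (res ++ words[i] ++ [' ']) p ga gb hs (by omega)]
      -- the take s of the remaining words is nonempty, so join_cons_cons applies
      have hlen : s ≤ (words.drop (i + 1)).length := by simp [List.length_drop]; omega
      obtain ⟨q, rest, hq⟩ : ∃ q rest, (words.drop (i + 1)).take s = q :: rest := by
        cases hc : (words.drop (i + 1)).take s with
        | nil => exfalso; have := congrArg List.length hc; simp at this; omega
        | cons q rest => exact ⟨q, rest, rfl⟩
      rw [hdrop]
      simp only [List.take_succ_cons, hq, PySem.Chars.join_cons_cons]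
      simp [List.append_assoc]

-- a run of A's loop that never reaches cur: every word gets a trailing space
theorem spaces_fold (words : List (List Char)) (s : Nat) : ∀ (i : Nat) (res : List Char) (C p ga gb : Int),
    i + s ≤ words.length → ((i : Int) + s) < C →
    (PySem.List.pyRange (i : Int) ((i : Int) + s) 1).foldl (aStep words) (res, C, p, ga, gb)
      = (res ++ ((words.drop i).take s).flatMap (· ++ [' ']), C, p, ga, gb) := by
  induction s with
  | zero =>
    intro i res C p ga gb _ _
    rw [PySem.List.pyRange_one_eq_nil (by push_cast; omega)]
    simp
  | succ s ih =>
    intro i res C p ga gb h1 h2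
    have hi : i < words.length := by omega
    have hdrop : words.drop i = words[i] :: words.drop (i + 1) := List.drop_eq_getElem_cons hi
    have hget : PySem.List.pyGetD words (i : Int) [] = words[i] := by
      rw [PySem.List.pyGetD_natCast]; exact List.getD_eq_getElem words [] hi
    have hcons : PySem.List.pyRange (i : Int) ((i : Int) + (s+1:Nat)) 1
        = (i : Int) :: PySem.List.pyRange ((i : Int) + 1) ((i : Int) + (s+1:Nat)) 1 :=
      PySem.List.pyRange_one_cons (by push_cast; omega)
    rw [hcons]
    simp only [List.foldl, aStep, hget]
    rw [if_neg (by push_cast at h2 ⊢; omega)]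
    have hcast : (i : Int) + ((s+1:Nat) : Int) = ((i+1 : Nat) : Int) + (s : Int) := by push_cast; ring
    rw [hcast, show ((i:Int)+1) = ((i+1 : Nat) : Int) from by push_cast; ring]
    rw [ih (i + 1) (res ++ words[i] ++ [' ']) C p ga gb (by omega) (by push_cast at h2 ⊢; omega)]
    rw [hdrop, List.take_succ_cons, List.flatMap_cons]
    simp [List.append_assoc]

-- main invariant: from any chunk boundary, A's remaining loop produces exactly B's remaining lines
theorem main_fold (words : List (List Char)) (fuel : Nat) :
    ∀ (i0 : Nat) (res0 : List Char) (p0 : Int) (a b : Nat),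
    1 ≤ a → 1 ≤ b → i0 < words.length → words.length - i0 ≤ fuel → p0 ≠ (words.length : Int) →
    ∃ curF prevF gaF gbF,
      (PySem.List.pyRange (i0 : Int) (words.length : Int) 1).foldl (aStep words)
          (res0, (i0 : Int) + a, p0, (b : Int), (a : Int) + b)
        = (res0 ++ PySem.Chars.join ['\n']
              (chunkLines (fiboSizes fuel a b 0 (words.length - i0)).1 (words.drop i0)) ++
            (if (fiboSizes fuel a b 0 (words.length - i0)).2 = words.length - i0 then ['\n'] else [' ']),
           curF, prevF, gaF, gbF)
        ∧ (prevF = (words.length : Int) ↔ (fiboSizes fuel a b 0 (words.length - i0)).2 = words.length - i0)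
        ∧ ((fiboSizes fuel a b 0 (words.length - i0)).2 ≠ words.length - i0 →
             curF = (i0 : Int) + (fiboSizes fuel a b 0 (words.length - i0)).2) := by
  induction fuel with
  | zero => intro i0 _ _ _ _ _ _ hi hf _; omega
  | succ fuel ih =>
    intro i0 res0 p0 a b ha hb hi hf hp
    have hm : 0 < words.length - i0 := by omega
    have hsz : fiboSizes (fuel + 1) a b 0 (words.length - i0)
        = (a :: (fiboSizes fuel b (a + b) a (words.length - i0)).1,
           (fiboSizes fuel b (a + b) a (words.length - i0)).2) := by
      simp [fiboSizes, hm]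
    by_cases hcase : a < words.length - i0
    · -- a full chunk fits strictly inside the remaining words; recurse
      have hle : a ≤ words.length - i0 := Nat.le_of_lt hcase
      have hshift := fiboSizes_shift fuel b (a + b) a (words.length - i0) hle
      have hrw : words.length - i0 - a = words.length - (i0 + a) := by omega
      rw [hrw] at hshift
      -- split the index range at the end of the first chunk
      rw [PySem.List.pyRange_one_append (i0 : Int) ((i0 : Int) + a) (words.length : Int)
            (by omega) (by omega), List.foldl_append]
      rw [chunk_fold words a i0 res0 p0 (b : Int) ((a : Int) + b) ha (by omega)]
      have hstate : ((i0 : Int) + (a : Int) + (b : Int)) = ((i0 + a : Nat) : Int) + (b : Int) := by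
        push_cast; ring
      have hstart : ((i0 : Int) + (a : Int)) = ((i0 + a : Nat) : Int) := by push_cast; ring
      have hga : ((a : Int) + (b : Int)) = ((a + b : Nat) : Int) := by push_cast; ring
      rw [hstate, hstart, hga]
      obtain ⟨curF, prevF, gaF, gbF, heq, hiff, hcur⟩ :=
        ih (i0 + a) (res0 ++ PySem.Chars.join [' '] ((words.drop i0).take a) ++ ['\n'])
          ((i0 + a : Nat) : Int) b (a + b) hb (by omega) (by omega) (by omega)
          (by exact_mod_cast (show i0 + a ≠ words.length by omega))
      refine ⟨curF, prevF, gaF, gbF, ?_, ?_, ?_⟩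
      · rw [heq, hsz]
        -- the tail of the size list is nonempty
        obtain ⟨q, qs, hq⟩ : ∃ q qs, (fiboSizes fuel b (a + b) 0 (words.length - (i0 + a))).1 = q :: qs := by
          cases fuel with
          | zero => omega
          | succ f =>
            refine ⟨b, (fiboSizes f (a + b) (b + (a + b)) (0 + b) (words.length - (i0 + a))).1, ?_⟩
            simp [fiboSizes, show 0 < words.length - (i0 + a) by omega]
        have hdd : (words.drop i0).drop a = words.drop (i0 + a) := by
          rw [List.drop_drop]
        have hsep : ((fiboSizes fuel b (a + b) 0 (words.length - (i0 + a))).2 = words.length - (i0 + a))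
            ↔ (a + (fiboSizes fuel b (a + b) 0 (words.length - (i0 + a))).2 = words.length - i0) := by omega
        rw [hshift]
        simp only [hq, chunkLines, PySem.Chars.join_cons_cons]
        by_cases hend : (fiboSizes fuel b (a + b) 0 (words.length - (i0 + a))).2 = words.length - (i0 + a)
        · rw [if_pos hend, if_pos (hsep.mp hend)]
          rw [hdd]
          simp [List.append_assoc]
        · rw [if_neg hend, if_neg (fun hc => hend (hsep.mpr hc))]
          rw [hdd]
          simp [List.append_assoc]
      · rw [hsz, hshift]
        constructor
        · intro h; have := hiff.mp h; omega
        · intro h; exact hiff.mpr (by omega)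
      · rw [hsz, hshift]
        intro h
        have h2 : (fiboSizes fuel b (a + b) 0 (words.length - (i0 + a))).2 ≠ words.length - (i0 + a) := by
          simp at h; omega
        rw [hcur h2]; push_cast; ring
    · -- the first chunk covers all remaining words
      have hstop : fiboSizes fuel b (a + b) a (words.length - i0) = ([], a) :=
        fiboSizes_stop fuel b (a + b) a (words.length - i0) (by omega)
      rw [hstop] at hsz
      by_cases heqam : a = words.length - i0
      · -- the chunk ends exactly at the last word
        have hend : (i0 : Int) + a = (words.length : Int) := by omega
        rw [show (words.length : Int) = (i0 : Int) + a from hend.symm]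
        rw [chunk_fold words a i0 res0 p0 (b : Int) ((a : Int) + b) ha (by omega)]
        refine ⟨(i0 : Int) + a + b, (i0 : Int) + a, (a : Int) + b, (b : Int) + ((a : Int) + b), ?_, ?_, ?_⟩
        · rw [hsz]
          simp only [chunkLines, PySem.Chars.join_singleton, if_pos heqam]
        · rw [hsz]; simp only []
          constructor
          · intro _; exact heqam
          · intro _; push_cast
        · rw [hsz]; intro h; exact absurd heqam h
      · -- the chunk overshoots: no linebreak is ever reached again
        have hgt : words.length - i0 < a := by omega
        have hrange : (words.length : Int) = (i0 : Int) + ((words.length - i0 : Nat) : Int) := by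
          omega
        rw [hrange, spaces_fold words (words.length - i0) i0 res0 ((i0 : Int) + a) p0 (b : Int)
              ((a : Int) + b) (by omega) (by omega), ← hrange]
        refine ⟨(i0 : Int) + a, p0, (b : Int), (a : Int) + b, ?_, ?_, ?_⟩
        · rw [hsz]
          have htk : (words.drop i0).take (words.length - i0) = words.drop i0 := by
            apply List.take_of_length_le; simp
          have htka : (words.drop i0).take a = words.drop i0 := by
            apply List.take_of_length_le; simp; omega
          have hne : words.drop i0 ≠ [] := by
            intro hnil; have := congrArg List.length hnil; simp at this; omega
          simp only [chunkLines, htk, htka, PySem.Chars.join_singleton, if_neg heqam]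
          rw [← join_flatMap ' ' (words.drop i0) hne]
          simp [List.append_assoc]
        · rw [hsz]; simp only []
          constructor
          · intro h; exact absurd h hp
          · intro h; exact absurd h heqam
        · rw [hsz]; intro _; push_cast; ring

-- the two programs agree on every input
theorem fibo_poem_eq (text : String) : fibo_poem text = fibo_poem_alt text := by
  unfold fibo_poem fibo_poem_alt
  by_cases ht : text = ""
  · subst ht
    rfl
  · rw [if_neg ht]
    by_cases hw : PySem.Chars.split₀ text.toList = []
    · rw [if_pos hw, hw]
      simp [PySem.Chars.slice_eq_listSlice, PySem.List.slice_to_neg_one]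
    · rw [if_neg hw]
      set words := PySem.Chars.split₀ text.toList with hwords
      have hn : 0 < words.length := List.length_pos_iff.mpr hw
      obtain ⟨curF, prevF, gaF, gbF, heq, hiff, hcur⟩ :=
        main_fold words words.length 0 [] 0 1 1 (le_refl 1) (le_refl 1) hn (by omega)
          (by exact_mod_cast (show (0 : Nat) ≠ words.length by omega))
      simp only [Nat.cast_zero, Nat.cast_one, List.drop_zero, Nat.sub_zero, List.nil_append,
        zero_add] at heq hiff hcur
      rw [show ((1 : Int), (0 : Int), (1 : Int), (2 : Int))
            = ((1 : Int), (0 : Int), (1 : Int), (1 : Int) + 1) from by norm_num]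
      simp only []
      rw [heq]
      simp only []
      set r := fiboSizes words.length 1 1 0 words.length with hr
      by_cases htot : r.2 = words.length
      · have hprev : prevF = (words.length : Int) := hiff.mpr htot
        rw [if_pos htot, if_pos hprev.symm]
        rw [PySem.Chars.slice_eq_listSlice, PySem.List.slice_to_neg_one, List.dropLast_concat]
        rw [hprev, show ((words.length : Int) - (words.length : Int)).toNat = 0 from by omega, htot]
        simp
      · have hprev : prevF ≠ (words.length : Int) := fun h => htot (hiff.mp h)
        rw [if_neg htot, if_neg (fun h => hprev h.symm)]
        rw [PySem.Chars.slice_eq_listSlice, PySem.List.slice_to_neg_one, List.dropLast_concat]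
        rw [hcur htot, show ((r.2 : Int) - (words.length : Int)).toNat = r.2 - words.length from by omega]

-- ===== VERDICT (by name: the statement is the Claim_ definition above) =====
theorem fibo_poem_spec : Claim_equal_fibo_poem := by
  intro text _
  unfold Spec_fibo_poem
  exact fibo_poem_eq text
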